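-- pv_equiv track=rewrite | github.com/chrisv-s/TechBasics1 | assignments/week9/escape_game.py | load_level
-- ===== SOURCE A (Python) =====
-- def load_level(level_map):
--     walls, exits, empty_spaces = set(), set(), set()
--     player_start, enemy_positions = None, set()
--     for y, row in enumerate(level_map):
--         for x, tile in enumerate(row):
--             pos = (x, y)
--             if tile == '#': walls.add(pos)
--             elif tile == 'P': player_start = pos; empty_spaces.add(pos)
--             elif tile == 'E': enemy_positions.add(pos); empty_spaces.add(pos)
--             elif tile == 'X': exits.add(pos); empty_spaces.add(pos)
--             else: empty_spaces.add(pos)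
--     return walls, exits, empty_spaces, player_start, enemy_positions
-- ===== SOURCE B (Python) =====
-- def load_level(level_map):
--     # Flatten the grid once into (position, tile) cells, then assemble each
--     # output by comprehension / set algebra instead of a branch-per-tile loop.
--     cells = [((x, y), tile)
--              for y, row in enumerate(level_map)
--              for x, tile in enumerate(row)]
--     walls = {p for p, t in cells if t == '#'}
--     exits = {p for p, t in cells if t == 'X'}
--     enemy_positions = {p for p, t in cells if t == 'E'}
--     empty_spaces = {p for p, _ in cells} - walls
--     p_list = [p for p, t in cells if t == 'P']
--     player_start = p_list[-1] if p_list else None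
--     return walls, exits, empty_spaces, player_start, enemy_positions
-- ===== Notes on version B (the rewrite author's own statement) =====
-- stated objective: alternative
-- what changed: B flattens the grid once into (position, tile) cells and then builds each output by a filter-comprehension / set difference (empty_spaces = all positions - walls, player = last 'P' position), replacing A's single nested loop with a 5-way branch that mutates five accumulators per tile.
import Mathlib
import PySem

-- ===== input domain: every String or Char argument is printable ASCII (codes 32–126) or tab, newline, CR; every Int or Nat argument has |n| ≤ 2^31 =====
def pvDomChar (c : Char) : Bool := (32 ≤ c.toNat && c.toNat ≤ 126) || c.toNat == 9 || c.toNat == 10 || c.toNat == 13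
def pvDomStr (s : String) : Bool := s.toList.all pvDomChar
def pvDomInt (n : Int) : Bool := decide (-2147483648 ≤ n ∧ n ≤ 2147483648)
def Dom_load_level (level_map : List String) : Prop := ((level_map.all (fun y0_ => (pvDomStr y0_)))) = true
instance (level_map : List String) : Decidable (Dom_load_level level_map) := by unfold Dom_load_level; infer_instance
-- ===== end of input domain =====

-- B flattens the grid once into (position, tile) cells and assembles each output by
-- filter/set-difference (empty = all positions - walls, player = last 'P'), instead of
-- A's nested loop with a 5-way branch mutating five accumulators per tile (alternative).


-- ===== PORT A =====
def load_level (level_map : List String) : (List (Int × Int)) × (List (Int × Int)) × (List (Int × Int)) × (Option (Int × Int)) × (List (Int × Int)) :=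
  (PySem.List.enumerate level_map 0).foldl
    (fun st yrow =>
      (PySem.List.enumerate yrow.2.toList 0).foldl
        (fun st xt =>
          let walls := st.1; let exits := st.2.1; let empty_spaces := st.2.2.1
          let player_start := st.2.2.2.1; let enemy_positions := st.2.2.2.2
          let pos : Int × Int := (xt.1, yrow.1)
          if xt.2 == '#' then (PySem.Set.add walls pos, exits, empty_spaces, player_start, enemy_positions)
          else if xt.2 == 'P' then (walls, exits, PySem.Set.add empty_spaces pos, some pos, enemy_positions)
          else if xt.2 == 'E' then (walls, exits, PySem.Set.add empty_spaces pos, player_start, PySem.Set.add enemy_positions pos)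
          else if xt.2 == 'X' then (walls, PySem.Set.add exits pos, PySem.Set.add empty_spaces pos, player_start, enemy_positions)
          else (walls, exits, PySem.Set.add empty_spaces pos, player_start, enemy_positions))
        st)
    (PySem.Set.empty, PySem.Set.empty, PySem.Set.empty, none, PySem.Set.empty)

-- ===== PORT B =====
def load_level_alt (level_map : List String) : (List (Int × Int)) × (List (Int × Int)) × (List (Int × Int)) × (Option (Int × Int)) × (List (Int × Int)) :=
  let cells : List ((Int × Int) × Char) :=
    (PySem.List.enumerate level_map 0).flatMap
      (fun yrow => (PySem.List.enumerate yrow.2.toList 0).map (fun xt => ((xt.1, yrow.1), xt.2)))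
  let walls := PySem.Set.ofList ((cells.filter (fun c => c.2 == '#')).map (·.1))
  let exits := PySem.Set.ofList ((cells.filter (fun c => c.2 == 'X')).map (·.1))
  let enemy_positions := PySem.Set.ofList ((cells.filter (fun c => c.2 == 'E')).map (·.1))
  let empty_spaces := PySem.Set.diff (PySem.Set.ofList (cells.map (·.1))) walls
  let p_list := (cells.filter (fun c => c.2 == 'P')).map (·.1)
  -- p_list[-1] if p_list else None
  let player_start := p_list.getLast?
  (walls, exits, empty_spaces, player_start, enemy_positions)

-- ===== PRECONDITION & SPEC =====
def Spec_load_level (level_map : List String) (out : (List (Int × Int)) × (List (Int × Int)) × (List (Int × Int)) × (Option (Int × Int)) × (List (Int × Int))) : Prop := out = load_level_alt level_map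
instance (level_map : List String) (out : (List (Int × Int)) × (List (Int × Int)) × (List (Int × Int)) × (Option (Int × Int)) × (List (Int × Int))) : Decidable (Spec_load_level level_map out) := by unfold Spec_load_level; infer_instance

-- ===== CLAIM (what is proved, stated in full; the proofs are below) =====
def Claim_equal_load_level : Prop := ∀ (level_map : List String), Dom_load_level level_map → Spec_load_level level_map (load_level level_map)

-- ===== LEMMAS AND PROOFS =====

lemma getLast?_cons_eq_or {α : Type} (x : α) (L : List α) :
    (x :: L).getLast? = L.getLast?.or (some x) := by
  cases hl : L.getLast? with
  | none => rw [List.getLast?_eq_none_iff] at hl; subst hl; simp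
  | some a =>
    rcases List.getLast?_eq_some_iff.mp hl with ⟨L', rfl⟩
    show ((x :: L') ++ [a]).getLast? = _
    rw [List.getLast?_concat]
    rfl

-- A's per-tile step, on the flattened (position, tile) cell
def stepA (st : (List (Int × Int)) × (List (Int × Int)) × (List (Int × Int)) × (Option (Int × Int)) × (List (Int × Int)))
    (c : (Int × Int) × Char) : (List (Int × Int)) × (List (Int × Int)) × (List (Int × Int)) × (Option (Int × Int)) × (List (Int × Int)) :=
  if c.2 == '#' then (PySem.Set.add st.1 c.1, st.2.1, st.2.2.1, st.2.2.2.1, st.2.2.2.2)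
  else if c.2 == 'P' then (st.1, st.2.1, PySem.Set.add st.2.2.1 c.1, some c.1, st.2.2.2.2)
  else if c.2 == 'E' then (st.1, st.2.1, PySem.Set.add st.2.2.1 c.1, st.2.2.2.1, PySem.Set.add st.2.2.2.2 c.1)
  else if c.2 == 'X' then (st.1, PySem.Set.add st.2.1 c.1, PySem.Set.add st.2.2.1 c.1, st.2.2.2.1, st.2.2.2.2)
  else (st.1, st.2.1, PySem.Set.add st.2.2.1 c.1, st.2.2.2.1, st.2.2.2.2)

def cellsOf (rows : List String) (s : Int) : List ((Int × Int) × Char) :=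
  (PySem.List.enumerate rows s).flatMap
    (fun yrow => (PySem.List.enumerate yrow.2.toList 0).map (fun xt => ((xt.1, yrow.1), xt.2)))

lemma cellsOf_cons (r : String) (rows : List String) (s : Int) :
    cellsOf (r :: rows) s =
      (PySem.List.enumerate r.toList 0).map (fun xt => ((xt.1, s), xt.2)) ++ cellsOf rows (s + 1) := by
  simp [cellsOf, PySem.List.enumerate_cons]

lemma snd_cellsOf (rows : List String) (s : Int) :
    ∀ c ∈ cellsOf rows s, s ≤ c.1.2 := by
  induction rows generalizing s with
  | nil => simp [cellsOf]
  | cons r rows ih =>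
    intro c hc
    rw [cellsOf_cons] at hc
    rcases List.mem_append.mp hc with h | h
    · rcases List.mem_map.mp h with ⟨xt, _, rfl⟩; simp
    · have := ih (s + 1) c h; omega

lemma nodup_fst_cellsOf (rows : List String) (s : Int) :
    ((cellsOf rows s).map (·.1)).Nodup := by
  induction rows generalizing s with
  | nil => simp [cellsOf]
  | cons r rows ih =>
    rw [cellsOf_cons, List.map_append, List.nodup_append]
    simp only [List.map_map]
    refine ⟨?_, ih (s + 1), ?_⟩
    · have hp := PySem.List.pairwise_lt_enumerate r.toList 0
      exact List.Pairwise.map _ (fun a b hlt => by simp only [Function.comp]; intro h; simp at h; omega) hp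
    · intro p hp q hq
      rcases List.mem_map.mp hp with ⟨xt, _, rfl⟩
      rcases List.mem_map.mp hq with ⟨c, hc, rfl⟩
      have hs := snd_cellsOf rows (s + 1) c hc
      intro h
      have : (s : Int) = c.1.2 := congrArg Prod.snd h
      omega

-- A's nested loop is the fold of stepA over the flattened cells
lemma load_level_eq_foldl (level_map : List String) :
    load_level level_map = (cellsOf level_map 0).foldl stepA
      (PySem.Set.empty, PySem.Set.empty, PySem.Set.empty, none, PySem.Set.empty) := by
  simp only [cellsOf, List.foldl_flatMap, List.foldl_map]
  rfl

-- closed form of the stepA fold, on any cell list with distinct positions disjoint from the state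
lemma foldl_stepA (cells : List ((Int × Int) × Char)) :
    ∀ (w e emp : List (Int × Int)) (pl : Option (Int × Int)) (en : List (Int × Int)),
      ((cells.map (·.1)).Nodup) →
      (∀ c ∈ cells, c.1 ∉ w ∧ c.1 ∉ e ∧ c.1 ∉ emp ∧ c.1 ∉ en) →
      cells.foldl stepA (w, e, emp, pl, en) =
        (w ++ (cells.filter (fun c => c.2 == '#')).map (·.1),
         e ++ (cells.filter (fun c => c.2 == 'X')).map (·.1),
         emp ++ (cells.filter (fun c => !(c.2 == '#'))).map (·.1),
         (((cells.filter (fun c => c.2 == 'P')).map (·.1)).getLast?).or pl,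
         en ++ (cells.filter (fun c => c.2 == 'E')).map (·.1)) := by
  induction cells with
  | nil => intro w e emp pl en _ _; simp
  | cons c rest ih =>
    intro w e emp pl en hnd h
    rw [List.map_cons, List.nodup_cons] at hnd
    have hc := h c (List.mem_cons_self)
    have hfresh : ∀ c' ∈ rest, c'.1 ≠ c.1 := by
      intro c' hc' heq
      exact hnd.1 (List.mem_map.mpr ⟨c', hc', heq⟩)
    have hnd' : (rest.map (·.1)).Nodup := hnd.2
    simp only [List.foldl_cons]
    by_cases h1 : c.2 = '#'
    · rw [show stepA (w, e, emp, pl, en) c = (w ++ [c.1], e, emp, pl, en) by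
        simp [stepA, h1, PySem.Set.add_of_not_mem hc.1]]
      rw [ih (w ++ [c.1]) e emp pl en hnd' (by
        intro c' hc'
        have := h c' (List.mem_cons_of_mem _ hc')
        refine ⟨?_, this.2.1, this.2.2.1, this.2.2.2⟩
        simp [this.1, hfresh c' hc'])]
      simp [h1, List.append_assoc]
    · by_cases h2 : c.2 = 'P'
      · rw [show stepA (w, e, emp, pl, en) c = (w, e, emp ++ [c.1], some c.1, en) by
          simp [stepA, h1, h2, PySem.Set.add_of_not_mem hc.2.2.1]]
        rw [ih w e (emp ++ [c.1]) (some c.1) en hnd' (by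
          intro c' hc'
          have := h c' (List.mem_cons_of_mem _ hc')
          refine ⟨this.1, this.2.1, ?_, this.2.2.2⟩
          simp [this.2.2.1, hfresh c' hc'])]
        simp [h1, h2, List.append_assoc, getLast?_cons_eq_or, Option.or_assoc]
      · by_cases h3 : c.2 = 'E'
        · rw [show stepA (w, e, emp, pl, en) c = (w, e, emp ++ [c.1], pl, en ++ [c.1]) by
            simp [stepA, h1, h2, h3, PySem.Set.add_of_not_mem hc.2.2.1, PySem.Set.add_of_not_mem hc.2.2.2]]
          rw [ih w e (emp ++ [c.1]) pl (en ++ [c.1]) hnd' (by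
            intro c' hc'
            have := h c' (List.mem_cons_of_mem _ hc')
            refine ⟨this.1, this.2.1, ?_, ?_⟩ <;>
              simp [this.2.2.1, this.2.2.2, hfresh c' hc'])]
          simp [h1, h2, h3, List.append_assoc]
        · by_cases h4 : c.2 = 'X'
          · rw [show stepA (w, e, emp, pl, en) c = (w, e ++ [c.1], emp ++ [c.1], pl, en) by
              simp [stepA, h1, h2, h3, h4, PySem.Set.add_of_not_mem hc.2.1, PySem.Set.add_of_not_mem hc.2.2.1]]
            rw [ih w (e ++ [c.1]) (emp ++ [c.1]) pl en hnd' (by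
              intro c' hc'
              have := h c' (List.mem_cons_of_mem _ hc')
              refine ⟨this.1, ?_, ?_, this.2.2.2⟩ <;>
                simp [this.2.1, this.2.2.1, hfresh c' hc'])]
            simp [h1, h2, h3, h4, List.append_assoc]
          · rw [show stepA (w, e, emp, pl, en) c = (w, e, emp ++ [c.1], pl, en) by
              simp [stepA, h1, h2, h3, h4, PySem.Set.add_of_not_mem hc.2.2.1]]
            rw [ih w e (emp ++ [c.1]) pl en hnd' (by
              intro c' hc'
              have := h c' (List.mem_cons_of_mem _ hc')
              refine ⟨this.1, this.2.1, ?_, this.2.2.2⟩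
              simp [this.2.2.1, hfresh c' hc'])]
            simp [h1, h2, h3, h4, List.append_assoc]

lemma nodup_filter_fst (cells : List ((Int × Int) × Char)) (p : ((Int × Int) × Char) → Bool)
    (hnd : (cells.map (·.1)).Nodup) : ((cells.filter p).map (·.1)).Nodup :=
  List.Nodup.sublist (List.Sublist.map (fun c : ((Int × Int) × Char) => c.1) List.filter_sublist) hnd

lemma empty_diff_eq (cells : List ((Int × Int) × Char)) (hnd : (cells.map (·.1)).Nodup) :
    PySem.Set.diff (cells.map (·.1)) ((cells.filter (fun c => c.2 == '#')).map (·.1)) =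
      (cells.filter (fun c => !(c.2 == '#'))).map (·.1) := by
  unfold PySem.Set.diff
  rw [List.filter_map]
  congr 1
  apply List.filter_congr
  intro c hc
  simp only [Function.comp]
  have hcont : PySem.Set.contains ((cells.filter (fun c => c.2 == '#')).map (·.1)) c.1 = (c.2 == '#') := by
    by_cases h1 : c.2 = '#'
    · have hmem : c.1 ∈ (cells.filter (fun c => c.2 == '#')).map (·.1) :=
        List.mem_map_of_mem (List.mem_filter.mpr ⟨hc, by simp [h1]⟩)
      simp [PySem.Set.contains_eq_listContains, h1, hmem]
    · have hmem : c.1 ∉ (cells.filter (fun c => c.2 == '#')).map (·.1) := by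
        intro hmem
        rcases List.mem_map.mp hmem with ⟨c', hc', heq⟩
        rcases List.mem_filter.mp hc' with ⟨hc'', ht⟩
        have := List.inj_on_of_nodup_map hnd hc'' hc heq
        subst this
        simp_all
      simp [PySem.Set.contains_eq_listContains, h1, hmem]
  rw [hcont]

-- B's port, written over the flattened cell list cellsOf (definitional)
lemma load_level_alt_eq (lm : List String) :
    load_level_alt lm =
      (PySem.Set.ofList (((cellsOf lm 0).filter (fun c => c.2 == '#')).map (·.1)),
       PySem.Set.ofList (((cellsOf lm 0).filter (fun c => c.2 == 'X')).map (·.1)),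
       PySem.Set.diff (PySem.Set.ofList ((cellsOf lm 0).map (·.1)))
         (PySem.Set.ofList (((cellsOf lm 0).filter (fun c => c.2 == '#')).map (·.1))),
       (((cellsOf lm 0).filter (fun c => c.2 == 'P')).map (·.1)).getLast?,
       PySem.Set.ofList (((cellsOf lm 0).filter (fun c => c.2 == 'E')).map (·.1))) := rfl

-- ===== VERDICT (by name: the statement is the Claim_ definition above) =====
theorem load_level_spec : Claim_equal_load_level := by
  intro level_map _
  unfold Spec_load_level
  have hnd := nodup_fst_cellsOf level_map 0
  rw [load_level_eq_foldl,
      foldl_stepA (cellsOf level_map 0) PySem.Set.empty PySem.Set.empty PySem.Set.empty none PySem.Set.empty hnd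
        (by intro c _; simp [PySem.Set.empty]),
      load_level_alt_eq,
      PySem.Set.ofList_eq_self_of_nodup _ (nodup_filter_fst (cellsOf level_map 0) (fun c : ((Int × Int) × Char) => c.2 == '#') hnd),
      PySem.Set.ofList_eq_self_of_nodup _ (nodup_filter_fst (cellsOf level_map 0) (fun c : ((Int × Int) × Char) => c.2 == 'X') hnd),
      PySem.Set.ofList_eq_self_of_nodup _ (nodup_filter_fst (cellsOf level_map 0) (fun c : ((Int × Int) × Char) => c.2 == 'E') hnd),
      PySem.Set.ofList_eq_self_of_nodup _ hnd,
      empty_diff_eq _ hnd]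
  simp [PySem.Set.empty, Option.or_none]
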